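-- pv_equiv track=rewrite | github.com/KadeJR/AdventOfCode2024 | Day_1/main.py | findSmallestNumPosInList
-- ===== SOURCE A (Python) =====
-- def findSmallestNumPosInList(list, excluding_list):
--     smallest = -1
--     smallest_index = -1
--     for i in range(len(list)):
--         if smallest == -1 and smallest_index == -1 and not numInList(excluding_list, i):
--             smallest = list[i]
--             smallest_index = i
--
--         elif list[i] < smallest and not numInList(excluding_list, i):
--             smallest = list[i]
--             smallest_index = i
--     return smallest_index
--
-- def numInList(list, num):
--     for i in range(len(list)):
--         if list[i] == num:
--             return True
--     return False
-- ===== SOURCE B (Python) =====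
-- def findSmallestNumPosInList(list, excluding_list):
--     excluded = set(excluding_list)
--     vals = [v for i, v in enumerate(list) if i not in excluded]
--     if not vals:
--         return -1
--     m = min(vals)
--     for i, v in enumerate(list):
--         if v == m and i not in excluded:
--             return i
--     return -1  # unreachable: m is the value of some non-excluded position
-- ===== Notes on version B (the rewrite author's own statement) =====
-- stated objective: faster
-- what changed: Replaces the single argmin-tracking loop with a linear membership scan per index by a two-pass scheme: build a set of excluded indices, take the min of the non-excluded values, then return the first index holding that min.
import Mathlib
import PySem

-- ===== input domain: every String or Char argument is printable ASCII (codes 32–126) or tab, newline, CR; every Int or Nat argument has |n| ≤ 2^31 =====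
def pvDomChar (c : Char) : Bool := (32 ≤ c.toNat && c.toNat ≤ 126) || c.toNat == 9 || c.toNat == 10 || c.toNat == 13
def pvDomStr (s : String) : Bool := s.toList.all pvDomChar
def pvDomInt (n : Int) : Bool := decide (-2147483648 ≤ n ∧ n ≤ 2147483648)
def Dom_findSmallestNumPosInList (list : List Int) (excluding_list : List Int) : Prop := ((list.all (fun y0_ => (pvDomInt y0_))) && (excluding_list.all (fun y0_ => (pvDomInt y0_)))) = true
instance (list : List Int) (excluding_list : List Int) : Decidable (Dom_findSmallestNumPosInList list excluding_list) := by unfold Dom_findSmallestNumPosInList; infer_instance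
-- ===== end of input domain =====

-- B replaces A's single argmin-tracking loop (with a linear numInList scan per index) by
-- an excluded-index set plus two passes: min of the non-excluded values, then the first
-- index holding that min.


-- ===== PORT A =====
def numInList (l : List Int) (num : Int) : Bool :=
  match l with
  | [] => false
  | x :: t => if x == num then true else numInList t num

def findSmallestNumPosInList (list : List Int) (excluding_list : List Int) : Int :=
  ((PySem.List.pyRange 0 (PySem.List.len list) 1).foldl
    (fun (st : Int × Int) i =>
      let v := PySem.List.pyGetD list i 0   -- list[i], i always in range
      if st.1 == -1 && st.2 == -1 && !(numInList excluding_list i) then (v, i)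
      else if decide (v < st.1) && !(numInList excluding_list i) then (v, i)
      else st)
    (-1, -1)).2

-- ===== PORT B =====
def findSmallestNumPosInList_alt (list : List Int) (excluding_list : List Int) : Int :=
  let excluded := PySem.Set.ofList excluding_list
  let vals := ((PySem.List.enumerate list).filter
      (fun p => !(PySem.Set.contains excluded p.1))).map Prod.snd
  if vals.isEmpty then -1
  else
    let m := (PySem.List.min? vals (fun y => y)).getD 0   -- vals nonempty, min? is some
    ((((PySem.List.enumerate list).find?
        (fun p => p.2 == m && !(PySem.Set.contains excluded p.1))).map Prod.fst).getD (-1))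

-- ===== PRECONDITION & SPEC =====
def Spec_findSmallestNumPosInList (list : List Int) (excluding_list : List Int) (out : Int) : Prop := out = findSmallestNumPosInList_alt list excluding_list
instance (list : List Int) (excluding_list : List Int) (out : Int) : Decidable (Spec_findSmallestNumPosInList list excluding_list out) := by unfold Spec_findSmallestNumPosInList; infer_instance

-- ===== CLAIM (what is proved, stated in full; the proofs are below) =====
def Claim_equal_findSmallestNumPosInList : Prop := ∀ (list : List Int) (excluding_list : List Int), Dom_findSmallestNumPosInList list excluding_list → Spec_findSmallestNumPosInList list excluding_list (findSmallestNumPosInList list excluding_list)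

-- ===== LEMMAS AND PROOFS =====

-- proof-side helpers: the "allowed" predicate, A's loop body, and A's loop body with the
-- (dead after the first pick) initial branch removed
def alP (excl : List Int) : Int × Int → Bool := fun p => !(excl.contains p.1)

def coreStep : Int × Int → Int × Int → Int × Int := fun st p =>
  if st.1 == -1 && st.2 == -1 then (p.2, p.1)
  else if decide (p.2 < st.1) then (p.2, p.1)
  else st

lemma numInList_eq_contains (l : List Int) (n : Int) : numInList l n = l.contains n := by
  induction l with
  | nil => rfl
  | cons x t ih =>
    by_cases h : x = n
    · simp [numInList, h]
    · have hb : (x == n) = false := by simpa using h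
      have hb2 : (n == x) = false := by simpa using (Ne.symm h)
      simp only [numInList, hb, Bool.false_eq_true, if_false, ih, List.contains_cons,
        hb2, Bool.false_or]

lemma stepA_eq (excl : List Int) (st p : Int × Int) :
    (if st.1 == -1 && st.2 == -1 && !(numInList excl p.1) then (p.2, p.1)
     else if decide (p.2 < st.1) && !(numInList excl p.1) then (p.2, p.1)
     else st)
    = if alP excl p then coreStep st p else st := by
  by_cases h : p.1 ∈ excl <;>
    simp [coreStep, alP, numInList_eq_contains, h]

lemma coreStep_of_nonneg (v0 i0 : Int) (h : 0 ≤ i0) (p : Int × Int) :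
    coreStep (v0, i0) p = if p.2 < v0 then (p.2, p.1) else (v0, i0) := by
  have h2 : (i0 == -1) = false := by simp; omega
  simp [coreStep, h2]

lemma foldl_min_comm (vs : List Int) : ∀ a b : Int, vs.foldl min (min a b) = min a (vs.foldl min b) := by
  induction vs with
  | nil => intro a b; rfl
  | cons c vs ih =>
    intro a b
    simp only [List.foldl_cons, min_assoc, ih]

lemma foldl_min_le (vs : List Int) (a : Int) : vs.foldl min a ≤ a := by
  have h := foldl_min_comm vs a a
  rw [min_self] at h
  rw [h]; exact min_le_left _ _

lemma foldl_min_mem (vs : List Int) : ∀ a : Int, vs.foldl min a = a ∨ vs.foldl min a ∈ vs := by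
  induction vs with
  | nil => intro a; left; rfl
  | cons c vs ih =>
    intro a
    simp only [List.foldl_cons]
    rcases ih (min a c) with h | h
    · rw [h]
      rcases min_choice a c with h' | h' <;> rw [h']
      · left; rfl
      · right; exact List.mem_cons_self
    · right; exact List.mem_cons_of_mem _ h

lemma find?_of_snd_mem (t : List (Int × Int)) (x : Int) (h : x ∈ t.map Prod.snd) :
    ∃ q, t.find? (fun p => p.2 == x) = some q := by
  have : (t.find? (fun p => p.2 == x)).isSome = true := by
    rw [List.find?_isSome]
    obtain ⟨p, hp, hpx⟩ := List.mem_map.mp h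
    exact ⟨p, hp, by simp [hpx]⟩
  exact Option.isSome_iff_exists.mp this

-- the heart: A's strict-improvement loop from a real state (index ≥ 0) ends at the first
-- index holding the running minimum
lemma foldl_core_snd (t : List (Int × Int)) : ∀ v0 i0 : Int, 0 ≤ i0 → (∀ p ∈ t, 0 ≤ p.1) →
    (t.foldl coreStep (v0, i0)).2 =
      if (t.map Prod.snd).foldl min v0 < v0
      then ((t.find? (fun p => p.2 == (t.map Prod.snd).foldl min v0)).map Prod.fst).getD i0
      else i0 := by
  induction t with
  | nil => intro v0 i0 h _; simp
  | cons q t ih =>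
    intro v0 i0 h0 hall
    have hq : 0 ≤ q.1 := hall q List.mem_cons_self
    have hall' : ∀ p ∈ t, 0 ≤ p.1 := fun p hp => hall p (List.mem_cons_of_mem _ hp)
    rw [List.foldl_cons, coreStep_of_nonneg v0 i0 h0 q]
    by_cases hv : q.2 < v0
    · rw [if_pos hv, ih q.2 q.1 hq hall']
      have hM : (((q :: t).map Prod.snd).foldl min v0) = (t.map Prod.snd).foldl min q.2 := by
        simp only [List.map_cons, List.foldl_cons]
        rw [min_eq_right (le_of_lt hv)]
      have hMle : (t.map Prod.snd).foldl min q.2 ≤ q.2 := foldl_min_le _ _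
      rw [hM, if_pos (lt_of_le_of_lt hMle hv)]
      by_cases hlt : (t.map Prod.snd).foldl min q.2 < q.2
      · rw [if_pos hlt]
        have hne : ¬ ((q.2 == (t.map Prod.snd).foldl min q.2) = true) := by simp; omega
        rw [List.find?_cons_of_neg (p := fun p : Int × Int => p.2 == (t.map Prod.snd).foldl min q.2) hne]
        rcases foldl_min_mem (t.map Prod.snd) q.2 with hm | hm
        · omega
        · obtain ⟨r, hr⟩ := find?_of_snd_mem t _ hm
          rw [hr]; rfl
      · rw [if_neg hlt]
        have heq : (t.map Prod.snd).foldl min q.2 = q.2 := le_antisymm hMle (not_lt.mp hlt)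
        have hbeq : ((q.2 == (t.map Prod.snd).foldl min q.2) = true) := by simp [heq]
        rw [List.find?_cons_of_pos (p := fun p : Int × Int => p.2 == (t.map Prod.snd).foldl min q.2) hbeq]
        rfl
    · rw [if_neg hv, ih v0 i0 h0 hall']
      have hM : (((q :: t).map Prod.snd).foldl min v0) = min q.2 ((t.map Prod.snd).foldl min v0) := by
        simp only [List.map_cons, List.foldl_cons]
        rw [min_comm v0 q.2, foldl_min_comm]
      rw [hM]
      by_cases hlt : (t.map Prod.snd).foldl min v0 < v0
      · have hmin : min q.2 ((t.map Prod.snd).foldl min v0) = (t.map Prod.snd).foldl min v0 := by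
          rw [min_eq_right]; omega
        rw [hmin, if_pos hlt, if_pos hlt]
        have hne : ¬ ((q.2 == (t.map Prod.snd).foldl min v0) = true) := by simp; omega
        rw [List.find?_cons_of_neg (p := fun p : Int × Int => p.2 == (t.map Prod.snd).foldl min v0) hne]
      · have hv0 : (t.map Prod.snd).foldl min v0 = v0 :=
          le_antisymm (foldl_min_le _ _) (not_lt.mp hlt)
        have hmin : min q.2 ((t.map Prod.snd).foldl min v0) = v0 := by
          rw [hv0, min_eq_right]; omega
        rw [hmin, if_neg (lt_irrefl v0), if_neg hlt]

lemma AB_eq (list excl : List Int) :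
    findSmallestNumPosInList list excl = findSmallestNumPosInList_alt list excl := by
  -- A's fold over range(len(list)) is a fold of coreStep over the filtered enumeration
  have hA : findSmallestNumPosInList list excl
      = (((PySem.List.enumerate list).filter (alP excl)).foldl coreStep (-1, -1)).2 := by
    unfold findSmallestNumPosInList
    rw [List.foldl_filter, PySem.List.enumerate_eq_map_pyRange list 0, List.foldl_map]
    refine congrArg Prod.snd (List.foldl_ext _ _ _ ?_)
    intro st j _
    exact stepA_eq excl st (j, PySem.List.pyGetD list j 0)
  -- B's set-membership test is the same "allowed" predicate
  have hset : (fun p : Int × Int => !(PySem.Set.contains (PySem.Set.ofList excl) p.1)) = alP excl := by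
    funext p
    simp [alP, PySem.Set.contains]
  -- B's find? over the full enumeration is a find? over the filtered enumeration
  have hfind : ∀ m : Int, (PySem.List.enumerate list).find?
        (fun p => p.2 == m && !(PySem.Set.contains (PySem.Set.ofList excl) p.1))
      = ((PySem.List.enumerate list).filter (alP excl)).find? (fun p => p.2 == m) := by
    intro m
    rw [List.find?_filter]
    congr 1
    funext p
    by_cases hm : p.2 = m <;>
      simp [alP, PySem.Set.contains, hm]
  have hpos : ∀ p ∈ (PySem.List.enumerate list).filter (alP excl), 0 ≤ p.1 := by
    intro p hp
    obtain ⟨k, hk, hpk⟩ := (PySem.List.mem_enumerate_iff _ _ _).mp (List.mem_filter.mp hp).1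
    rw [hpk]; simp
  rw [hA]
  unfold findSmallestNumPosInList_alt
  simp only [hset, hfind]
  cases hF : (PySem.List.enumerate list).filter (alP excl) with
  | nil => simp
  | cons q t =>
    have hq : 0 ≤ q.1 := hpos q (hF ▸ List.mem_cons_self)
    have hall : ∀ p ∈ t, 0 ≤ p.1 := fun p hp => hpos p (hF ▸ List.mem_cons_of_mem _ hp)
    -- A picks the first allowed pair q, then runs the strict-improvement loop on the rest
    have hcore : coreStep (-1, -1) q = (q.2, q.1) := by simp [coreStep]
    rw [List.foldl_cons, hcore, foldl_core_snd t q.2 q.1 hq hall]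
    -- B: vals = q.2 :: snd of the rest, m = their running minimum
    simp only [List.map_cons, List.isEmpty_cons, Bool.false_eq_true, if_false,
      PySem.List.min?_id_cons, Option.getD_some]
    set M := List.foldl min q.2 (t.map Prod.snd) with hMdef
    have hle : M ≤ q.2 := foldl_min_le _ _
    by_cases hlt : M < q.2
    · rw [if_pos hlt]
      have hne : ¬ ((q.2 == M) = true) := by simp; omega
      rw [List.find?_cons_of_neg (p := fun p : Int × Int => p.2 == M) hne]
      rcases foldl_min_mem (t.map Prod.snd) q.2 with hm | hm
      · omega
      · obtain ⟨r, hr⟩ := find?_of_snd_mem t M (hMdef ▸ hm)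
        rw [hr]; rfl
    · rw [if_neg hlt]
      have hbeq : ((q.2 == M) = true) := by
        have : M = q.2 := le_antisymm hle (not_lt.mp hlt)
        simp [this]
      rw [List.find?_cons_of_pos (p := fun p : Int × Int => p.2 == M) hbeq]
      rfl

-- ===== VERDICT (by name: the statement is the Claim_ definition above) =====
theorem findSmallestNumPosInList_spec : Claim_equal_findSmallestNumPosInList := by
  intro list excl _
  unfold Spec_findSmallestNumPosInList
  exact AB_eq list excl
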